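-- pv_equiv track=rewrite | github.com/AsobaCloud/newsroom | article_tagger.py | get_core_topic_categories
-- ===== SOURCE A (Python) =====
-- from typing import List, Dict, Set
--
-- CORE_TOPICS = {
--     "energy": [
--         "energy", "electricity", "renewable energy", "solar power", "wind energy",
--         "battery storage", "smart grid", "microgrid", "electric vehicles",
--         "capacity market", "demand response", "carbon pricing", "carbon tax",
--         "feed-in tariff", "grid reliability", "transmission planning",
--         "levelized cost of energy", "power purchase agreement", "green bond",
--         "esg investment", "coal", "rare earth minerals", "lithium", "nuclear",
--         "gas", "oil", "supply chain"
--     ],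
--     "ai": [
--         "artificial intelligence", "ai", "machine learning", "ml", "neural network",
--         "deep learning", "cybersecurity", "digital twin", "predictive analytics"
--     ],
--     "blockchain": [
--         "blockchain", "cryptocurrency", "bitcoin", "ethereum", "crypto",
--         "defi", "web3"
--     ],
--     "insurance": [
--         "insurance", "catastrophe modeling", "exposure data", "reinsurance",
--         "underwriting", "climate risk"
--     ],
--     "geopolitics": [
--         "war", "civil unrest", "protest", "climate risk", "conflict",
--         "diplomacy", "sanctions", "trade war", "military", "defense",
--         "security", "terrorism", "refugees", "migration"
--     ]
-- }
--
-- def get_core_topic_categories(matched_keywords: List[str]) -> List[str]: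
--     """
--     Map matched keywords to core topic categories.
--
--     Args:
--         matched_keywords: List of keywords that matched the article
--
--     Returns:
--         List of core topic categories
--     """
--     if not matched_keywords:
--         return []
--
--     categories = set()
--
--     for keyword in matched_keywords:
--         keyword_lower = keyword.lower()
--         for category, keywords in CORE_TOPICS.items():
--             if keyword_lower in [k.lower() for k in keywords]:
--                 categories.add(category)
--
--     return list(categories)
-- ===== SOURCE B (Python) =====
-- from typing import List
--
-- # Precomputed inverse of CORE_TOPICS: lowercased keyword -> its categories.
-- # ("climate risk" belongs to both insurance and geopolitics.)
-- KW_TO_CATS = {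
--     "energy": ['energy'],
--     "electricity": ['energy'],
--     "renewable energy": ['energy'],
--     "solar power": ['energy'],
--     "wind energy": ['energy'],
--     "battery storage": ['energy'],
--     "smart grid": ['energy'],
--     "microgrid": ['energy'],
--     "electric vehicles": ['energy'],
--     "capacity market": ['energy'],
--     "demand response": ['energy'],
--     "carbon pricing": ['energy'],
--     "carbon tax": ['energy'],
--     "feed-in tariff": ['energy'],
--     "grid reliability": ['energy'],
--     "transmission planning": ['energy'],
--     "levelized cost of energy": ['energy'],
--     "power purchase agreement": ['energy'],
--     "green bond": ['energy'],
--     "esg investment": ['energy'],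
--     "coal": ['energy'],
--     "rare earth minerals": ['energy'],
--     "lithium": ['energy'],
--     "nuclear": ['energy'],
--     "gas": ['energy'],
--     "oil": ['energy'],
--     "supply chain": ['energy'],
--     "artificial intelligence": ['ai'],
--     "ai": ['ai'],
--     "machine learning": ['ai'],
--     "ml": ['ai'],
--     "neural network": ['ai'],
--     "deep learning": ['ai'],
--     "cybersecurity": ['ai'],
--     "digital twin": ['ai'],
--     "predictive analytics": ['ai'],
--     "blockchain": ['blockchain'],
--     "cryptocurrency": ['blockchain'],
--     "bitcoin": ['blockchain'],
--     "ethereum": ['blockchain'],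
--     "crypto": ['blockchain'],
--     "defi": ['blockchain'],
--     "web3": ['blockchain'],
--     "insurance": ['insurance'],
--     "catastrophe modeling": ['insurance'],
--     "exposure data": ['insurance'],
--     "reinsurance": ['insurance'],
--     "underwriting": ['insurance'],
--     "climate risk": ['insurance', 'geopolitics'],
--     "war": ['geopolitics'],
--     "civil unrest": ['geopolitics'],
--     "protest": ['geopolitics'],
--     "conflict": ['geopolitics'],
--     "diplomacy": ['geopolitics'],
--     "sanctions": ['geopolitics'],
--     "trade war": ['geopolitics'],
--     "military": ['geopolitics'],
--     "defense": ['geopolitics'],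
--     "security": ['geopolitics'],
--     "terrorism": ['geopolitics'],
--     "refugees": ['geopolitics'],
--     "migration": ['geopolitics'],
-- }
--
--
-- def get_core_topic_categories(matched_keywords: List[str]) -> List[str]:
--     """Map matched keywords to core topic categories via the inverted index."""
--     return list(dict.fromkeys(
--         cat
--         for kw in matched_keywords
--         for cat in KW_TO_CATS.get(kw.lower(), ())
--     ))
-- ===== Notes on version B (the rewrite author's own statement) =====
-- stated objective: faster
-- what changed: Replaces A's nested scan (every keyword rebuilds and searches every category's lowercased keyword list) with a precomputed literal inverted index (lowercased keyword -> its categories), so each matched keyword becomes one dict lookup, deduplicated in order by dict.fromkeys; CORE_TOPICS is not consulted at call time at all.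
import Mathlib
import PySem

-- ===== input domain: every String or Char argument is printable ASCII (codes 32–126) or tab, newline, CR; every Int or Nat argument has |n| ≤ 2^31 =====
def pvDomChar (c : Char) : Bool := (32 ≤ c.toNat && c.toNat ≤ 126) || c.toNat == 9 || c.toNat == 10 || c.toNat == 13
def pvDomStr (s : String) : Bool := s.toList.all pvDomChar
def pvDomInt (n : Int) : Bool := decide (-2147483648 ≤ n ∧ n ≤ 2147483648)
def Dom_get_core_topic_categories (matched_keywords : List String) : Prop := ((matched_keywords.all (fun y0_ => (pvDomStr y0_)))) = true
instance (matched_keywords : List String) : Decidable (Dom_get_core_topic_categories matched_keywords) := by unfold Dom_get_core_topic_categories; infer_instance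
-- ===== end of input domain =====

-- ===== PORT A =====
-- B replaces A's per-keyword rescan of every category's lowercased keyword list with a
-- precomputed literal inverted index (lowercased keyword -> its categories), one lookup
-- per keyword, deduplicated in first-occurrence order; Python's list(set) order is
-- hash-dependent and outputs are compared as sets.

-- module-level constant CORE_TOPICS (dict -> association list in insertion order)
def coreTopics : List (String × List String) := [
    ("energy", ["energy", "electricity", "renewable energy", "solar power", "wind energy", "battery storage", "smart grid", "microgrid", "electric vehicles", "capacity market", "demand response", "carbon pricing", "carbon tax", "feed-in tariff", "grid reliability", "transmission planning", "levelized cost of energy", "power purchase agreement", "green bond", "esg investment", "coal", "rare earth minerals", "lithium", "nuclear", "gas", "oil", "supply chain"]),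
    ("ai", ["artificial intelligence", "ai", "machine learning", "ml", "neural network", "deep learning", "cybersecurity", "digital twin", "predictive analytics"]),
    ("blockchain", ["blockchain", "cryptocurrency", "bitcoin", "ethereum", "crypto", "defi", "web3"]),
    ("insurance", ["insurance", "catastrophe modeling", "exposure data", "reinsurance", "underwriting", "climate risk"]),
    ("geopolitics", ["war", "civil unrest", "protest", "climate risk", "conflict", "diplomacy", "sanctions", "trade war", "military", "defense", "security", "terrorism", "refugees", "migration"])
  ]

def get_core_topic_categories (matched_keywords : List String) : List String :=
  if matched_keywords = [] then []
  else
    (matched_keywords.foldl (fun categories keyword =>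
      let keyword_lower := PySem.Str.lower keyword
      coreTopics.foldl (fun categories p =>
        if (p.2.map PySem.Str.lower).contains keyword_lower
        then PySem.Set.add categories p.1 else categories) categories)
      PySem.Set.empty)

-- ===== PORT B =====
-- module-level constant KW_TO_CATS: precomputed literal inverted index
def kwToCats : PySem.Dict String (List String) := PySem.Dict.ofList [
    ("energy", ["energy"]),
    ("electricity", ["energy"]),
    ("renewable energy", ["energy"]),
    ("solar power", ["energy"]),
    ("wind energy", ["energy"]),
    ("battery storage", ["energy"]),
    ("smart grid", ["energy"]),
    ("microgrid", ["energy"]),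
    ("electric vehicles", ["energy"]),
    ("capacity market", ["energy"]),
    ("demand response", ["energy"]),
    ("carbon pricing", ["energy"]),
    ("carbon tax", ["energy"]),
    ("feed-in tariff", ["energy"]),
    ("grid reliability", ["energy"]),
    ("transmission planning", ["energy"]),
    ("levelized cost of energy", ["energy"]),
    ("power purchase agreement", ["energy"]),
    ("green bond", ["energy"]),
    ("esg investment", ["energy"]),
    ("coal", ["energy"]),
    ("rare earth minerals", ["energy"]),
    ("lithium", ["energy"]),
    ("nuclear", ["energy"]),
    ("gas", ["energy"]),
    ("oil", ["energy"]),
    ("supply chain", ["energy"]),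
    ("artificial intelligence", ["ai"]),
    ("ai", ["ai"]),
    ("machine learning", ["ai"]),
    ("ml", ["ai"]),
    ("neural network", ["ai"]),
    ("deep learning", ["ai"]),
    ("cybersecurity", ["ai"]),
    ("digital twin", ["ai"]),
    ("predictive analytics", ["ai"]),
    ("blockchain", ["blockchain"]),
    ("cryptocurrency", ["blockchain"]),
    ("bitcoin", ["blockchain"]),
    ("ethereum", ["blockchain"]),
    ("crypto", ["blockchain"]),
    ("defi", ["blockchain"]),
    ("web3", ["blockchain"]),
    ("insurance", ["insurance"]),
    ("catastrophe modeling", ["insurance"]),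
    ("exposure data", ["insurance"]),
    ("reinsurance", ["insurance"]),
    ("underwriting", ["insurance"]),
    ("climate risk", ["insurance", "geopolitics"]),
    ("war", ["geopolitics"]),
    ("civil unrest", ["geopolitics"]),
    ("protest", ["geopolitics"]),
    ("conflict", ["geopolitics"]),
    ("diplomacy", ["geopolitics"]),
    ("sanctions", ["geopolitics"]),
    ("trade war", ["geopolitics"]),
    ("military", ["geopolitics"]),
    ("defense", ["geopolitics"]),
    ("security", ["geopolitics"]),
    ("terrorism", ["geopolitics"]),
    ("refugees", ["geopolitics"]),
    ("migration", ["geopolitics"])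
  ]

def get_core_topic_categories_alt (matched_keywords : List String) : List String :=
  PySem.List.dedup (matched_keywords.flatMap (fun kw =>
    kwToCats.getD (PySem.Str.lower kw) []))

-- ===== PRECONDITION & SPEC =====
def Spec_get_core_topic_categories (matched_keywords : List String) (out : List String) : Prop := out = get_core_topic_categories_alt matched_keywords
instance (matched_keywords : List String) (out : List String) : Decidable (Spec_get_core_topic_categories matched_keywords out) := by unfold Spec_get_core_topic_categories; infer_instance

-- ===== CLAIM (what is proved, stated in full; the proofs are below) =====
def Claim_equal_get_core_topic_categories : Prop := ∀ (matched_keywords : List String), Dom_get_core_topic_categories matched_keywords → Spec_get_core_topic_categories matched_keywords (get_core_topic_categories matched_keywords)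

-- ===== LEMMAS AND PROOFS =====

-- the categories whose lowercased keyword list contains s, in CORE_TOPICS order
def catsOf (s : String) : List String :=
  coreTopics.filterMap (fun p =>
    if (p.2.map PySem.Str.lower).contains s then some p.1 else none)

-- all keyword strings occurring in CORE_TOPICS (they are already lowercase)
def allKw : List String := kwToCats.keys

theorem inner_foldl (pairs : List (String × List String)) (s : String) :
    ∀ acc : PySem.Set String,
      pairs.foldl (fun categories p =>
        if (p.2.map PySem.Str.lower).contains s
        then PySem.Set.add categories p.1 else categories) acc
      = (pairs.filterMap (fun p =>
          if (p.2.map PySem.Str.lower).contains s then some p.1 else none)).foldl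
          PySem.Set.add acc := by
  induction pairs with
  | nil => intro acc; rfl
  | cons p ps ih =>
    intro acc
    by_cases h : ((p.2.map PySem.Str.lower).contains s) = true
    · rw [List.foldl_cons, if_pos h,
        List.filterMap_cons_some (l := ps) (b := p.1) (by rw [if_pos h]),
        List.foldl_cons, ih]
    · rw [List.foldl_cons, if_neg h,
        List.filterMap_cons_none (l := ps) (by rw [if_neg h]), ih]

set_option maxRecDepth 20000 in
theorem coreTopics_kw_sub :
    ∀ p ∈ coreTopics, ∀ x ∈ p.2.map PySem.Str.lower, x ∈ allKw := by decide

set_option maxRecDepth 20000 in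
theorem key_lemma (s : String) : kwToCats.getD s [] = catsOf s := by
  by_cases h : s ∈ allKw
  · fin_cases h <;> decide
  · have hcon : kwToCats.contains s = false := by
      rw [PySem.Dict.contains_eq_decide_mem_keys]
      simpa [allKw] using h
    rw [PySem.Dict.getD_of_not_contains _ _ hcon]
    symm
    rw [catsOf, List.filterMap_eq_nil_iff]
    intro p hp
    rw [if_neg]
    intro hcon2
    exact h (coreTopics_kw_sub p hp s (by simpa using hcon2))

theorem foldl_add_flat (l : List String) (f : String → List String) :
    ∀ acc : PySem.Set String,
      l.foldl (fun acc x => (f x).foldl PySem.Set.add acc) acc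
      = (l.flatMap f).foldl PySem.Set.add acc := by
  induction l with
  | nil => intro acc; rfl
  | cons x xs ih => intro acc; simp [List.flatMap_cons, List.foldl_append, ih]

-- ===== VERDICT (by name: the statement is the Claim_ definition above) =====
theorem get_core_topic_categories_spec : Claim_equal_get_core_topic_categories := by
  intro mk _
  unfold Spec_get_core_topic_categories get_core_topic_categories get_core_topic_categories_alt
  by_cases hmk : mk = []
  · subst hmk; rfl
  · simp only [hmk, if_false]
    have hstep : (fun (categories : PySem.Set String) (keyword : String) =>
        coreTopics.foldl (fun categories p =>
          if (p.2.map PySem.Str.lower).contains (PySem.Str.lower keyword)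
          then PySem.Set.add categories p.1 else categories) categories)
        = fun categories keyword =>
            (catsOf (PySem.Str.lower keyword)).foldl PySem.Set.add categories := by
      funext categories keyword
      exact inner_foldl coreTopics (PySem.Str.lower keyword) categories
    rw [hstep]
    have hflat : (fun kw => kwToCats.getD (PySem.Str.lower kw) [])
        = fun kw => catsOf (PySem.Str.lower kw) := funext fun kw => key_lemma _
    rw [hflat, foldl_add_flat mk (fun kw => catsOf (PySem.Str.lower kw)) PySem.Set.empty,
        PySem.List.dedup_eq_ofList, PySem.Set.ofList_eq_foldl]
    rfl
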